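-- pv_equiv track=rewrite | github.com/mackaveli07/DratingsClone | app.py | injury_adjustment
-- ===== SOURCE A (Python) =====
-- def injury_adjustment(players):
--     penalty = 0
--     for p in players:
--         s = (p.get("status") or "").lower()
--         pos = (p.get("position") or "").upper()
--         if pos == "QB" and s in ["out", "doubtful"]:
--             penalty -= 50
--         elif pos in ["RB","WR","TE"] and s in ["out","doubtful"]:
--             penalty -= 15
--         elif s in ["out","doubtful"]:
--             penalty -= 10
--     return penalty
-- ===== SOURCE B (Python) =====
-- def injury_adjustment(players):
--     bad = [p for p in players
--            if ((p.get("status") or "").lower() in ("out", "doubtful"))]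
--     qb = sum(1 for p in bad if (p.get("position") or "").upper() == "QB")
--     skill = sum(1 for p in bad
--                 if (p.get("position") or "").upper() in ("RB", "WR", "TE"))
--     other = len(bad) - qb - skill
--     return -(50 * qb + 15 * skill + 10 * other)
-- ===== Notes on version B (the rewrite author's own statement) =====
-- stated objective: alternative
-- what changed: B first filters the injured ('out'/'doubtful') players into a list, then computes the QB/skill/other bucket counts over that list and returns the penalty as a single arithmetic expression, instead of A's one-pass accumulate-in-an-if/elif loop.
import Mathlib
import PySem

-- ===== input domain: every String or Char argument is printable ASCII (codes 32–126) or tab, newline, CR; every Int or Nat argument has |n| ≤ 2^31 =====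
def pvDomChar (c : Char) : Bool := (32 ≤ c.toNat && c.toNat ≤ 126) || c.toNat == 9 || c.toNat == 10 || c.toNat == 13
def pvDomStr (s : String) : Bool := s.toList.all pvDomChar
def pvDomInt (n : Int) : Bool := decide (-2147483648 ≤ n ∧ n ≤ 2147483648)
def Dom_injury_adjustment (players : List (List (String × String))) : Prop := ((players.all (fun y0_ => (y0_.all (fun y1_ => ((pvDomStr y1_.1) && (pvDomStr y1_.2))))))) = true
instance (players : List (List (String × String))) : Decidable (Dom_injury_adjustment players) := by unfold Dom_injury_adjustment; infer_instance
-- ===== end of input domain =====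

-- B replaces A's accumulate-in-an-if/elif loop by filter-the-injured-then-count-buckets arithmetic (alternative decomposition, same cost).


-- shared helper: Python's p.get(k) on an association list (first match), as both Pythons call it
def pvGet (p : List (String × String)) (k : String) : Option String :=
  (p.find? (fun kv => kv.1 == k)).map (·.2)

-- ===== PORT A =====
def injury_adjustment (players : List (List (String × String))) : Int :=
  players.foldl
    (fun penalty p =>
      let s := PySem.Str.lower ((pvGet p "status").getD "")
      let pos := PySem.Str.upper ((pvGet p "position").getD "")
      if pos == "QB" && (s == "out" || s == "doubtful") then penalty - 50
      else if (pos == "RB" || pos == "WR" || pos == "TE") && (s == "out" || s == "doubtful") then penalty - 15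
      else if s == "out" || s == "doubtful" then penalty - 10
      else penalty)
    0

-- ===== PORT B =====
def pvIsBad (p : List (String × String)) : Bool :=
  let s := PySem.Str.lower ((pvGet p "status").getD "")
  s == "out" || s == "doubtful"

def pvPos (p : List (String × String)) : String :=
  PySem.Str.upper ((pvGet p "position").getD "")

def injury_adjustment_alt (players : List (List (String × String))) : Int :=
  let bad := players.filter pvIsBad
  let qb : Int := (bad.filter (fun p => pvPos p == "QB")).length
  let skill : Int := (bad.filter (fun p => pvPos p == "RB" || pvPos p == "WR" || pvPos p == "TE")).length
  let other : Int := (bad.length : Int) - qb - skill;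
  -(50 * qb + 15 * skill + 10 * other)

-- ===== PRECONDITION & SPEC =====
def Spec_injury_adjustment (players : List (List (String × String))) (out : Int) : Prop := out = injury_adjustment_alt players
instance (players : List (List (String × String))) (out : Int) : Decidable (Spec_injury_adjustment players out) := by unfold Spec_injury_adjustment; infer_instance

-- ===== CLAIM (what is proved, stated in full; the proofs are below) =====
def Claim_equal_injury_adjustment : Prop := ∀ (players : List (List (String × String))), Dom_injury_adjustment players → Spec_injury_adjustment players (injury_adjustment players)

-- ===== LEMMAS AND PROOFS =====

-- A's fold step as a named function (definitionally equal to the lambda in the port)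
def pvStep (penalty : Int) (p : List (String × String)) : Int :=
  let s := PySem.Str.lower ((pvGet p "status").getD "")
  let pos := PySem.Str.upper ((pvGet p "position").getD "")
  if pos == "QB" && (s == "out" || s == "doubtful") then penalty - 50
  else if (pos == "RB" || pos == "WR" || pos == "TE") && (s == "out" || s == "doubtful") then penalty - 15
  else if s == "out" || s == "doubtful" then penalty - 10
  else penalty

-- pvStep expressed through B's classifiers
theorem pvStep_cases (a : Int) (p : List (String × String)) :
    pvStep a p = a + (if pvIsBad p then
        (if pvPos p == "QB" then (-50 : Int)
         else if pvPos p == "RB" || pvPos p == "WR" || pvPos p == "TE" then -15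
         else -10)
      else 0) := by
  simp only [pvStep, pvIsBad, pvPos]
  by_cases h1 : (PySem.Str.upper ((pvGet p "position").getD "") == "QB") = true <;>
  by_cases h2 : (PySem.Str.upper ((pvGet p "position").getD "") == "RB"
      || PySem.Str.upper ((pvGet p "position").getD "") == "WR"
      || PySem.Str.upper ((pvGet p "position").getD "") == "TE") = true <;>
  by_cases h3 : (PySem.Str.lower ((pvGet p "status").getD "") == "out"
      || PySem.Str.lower ((pvGet p "status").getD "") == "doubtful") = true <;>
  simp [h1, h2, h3] <;> ring

theorem foldl_pvStep_shift (ps : List (List (String × String))) (a b : Int) :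
    ps.foldl pvStep (a + b) = a + ps.foldl pvStep b := by
  induction ps generalizing b with
  | nil => simp
  | cons p t ih =>
    simp only [List.foldl_cons]
    rw [pvStep_cases (a + b) p, pvStep_cases b p, add_assoc, ih]

theorem alt_cons (p : List (String × String)) (t : List (List (String × String))) :
    injury_adjustment_alt (p :: t) = pvStep 0 p + injury_adjustment_alt t := by
  rw [pvStep_cases 0 p]
  simp only [injury_adjustment_alt, List.filter_cons]
  by_cases hb : pvIsBad p = true
  · simp only [hb, if_true]
    by_cases hq : (pvPos p == "QB") = true
    · have hpos : pvPos p = "QB" := by rwa [beq_iff_eq] at hq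
      have hs : (pvPos p == "RB" || pvPos p == "WR" || pvPos p == "TE") = false := by
        rw [hpos]; decide
      simp only [List.filter_cons, hq, hs, if_true, Bool.false_eq_true, if_false,
        List.length_cons]
      push_cast; ring
    · by_cases hs : (pvPos p == "RB" || pvPos p == "WR" || pvPos p == "TE") = true
      · simp only [List.filter_cons, hq, hs, if_true, List.length_cons]
        push_cast; ring
      · simp only [List.filter_cons, hq, hs, List.length_cons]
        push_cast; ring
  · simp only [Bool.not_eq_true] at hb
    simp [hb]

theorem injury_adjustment_eq_alt (ps : List (List (String × String))) :
    injury_adjustment ps = injury_adjustment_alt ps := by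
  induction ps with
  | nil => simp [injury_adjustment, injury_adjustment_alt]
  | cons p t ih =>
    have hA : injury_adjustment (p :: t) = pvStep 0 p + injury_adjustment t := by
      show t.foldl pvStep (pvStep 0 p) = pvStep 0 p + t.foldl pvStep 0
      rw [← add_zero (pvStep 0 p), foldl_pvStep_shift, add_zero]
    rw [hA, ih, alt_cons]

-- ===== VERDICT (by name: the statement is the Claim_ definition above) =====
theorem injury_adjustment_spec : Claim_equal_injury_adjustment := by
  intro ps _
  exact injury_adjustment_eq_alt ps
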